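-- pv_equiv track=rewrite | github.com/PhilHarnish/forge | src/data/convert/str_to_str.py | _str_to_str
-- ===== SOURCE A (Python) =====
-- def _str_to_str(input, str_map, acc):
--   for prefix, replacements in str_map.items():
--     if not input.startswith(prefix):
--       continue
--     for replacement in replacements:
--       acc.append(replacement)
--       yield from _str_to_str(input[len(prefix):], str_map, acc)
--       acc.pop()
--   if not input:
--     yield ''.join(acc)
-- ===== SOURCE B (Python) =====
-- def _str_to_str(input, str_map, acc):
--   # B: bottom-up dynamic programming over suffix start positions (table[i] = all
--   # decomposition strings of input[i:]), instead of A's recursive backtracking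
--   # generator; each shared suffix is expanded once and its row is reused.
--   n = len(input)
--   table = {}
--   for i in range(n, -1, -1):
--     row = []
--     for prefix, replacements in str_map.items():
--       if input.startswith(prefix, i):
--         for replacement in replacements:
--           row.extend(replacement + tail for tail in table[i + len(prefix)])
--     if i == n:
--       row.append('')
--     table[i] = row
--   prefix_str = ''.join(acc)
--   for s in table[0]:
--     yield prefix_str + s
-- ===== Notes on version B (the rewrite author's own statement) =====
-- stated objective: alternative
-- what changed: B replaces A's recursive backtracking generator (mutate/restore acc, re-expanding each suffix at every visit) with a bottom-up dynamic-programming table of all decompositions per suffix start position, built once from the end of the string and reused.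
import Mathlib
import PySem

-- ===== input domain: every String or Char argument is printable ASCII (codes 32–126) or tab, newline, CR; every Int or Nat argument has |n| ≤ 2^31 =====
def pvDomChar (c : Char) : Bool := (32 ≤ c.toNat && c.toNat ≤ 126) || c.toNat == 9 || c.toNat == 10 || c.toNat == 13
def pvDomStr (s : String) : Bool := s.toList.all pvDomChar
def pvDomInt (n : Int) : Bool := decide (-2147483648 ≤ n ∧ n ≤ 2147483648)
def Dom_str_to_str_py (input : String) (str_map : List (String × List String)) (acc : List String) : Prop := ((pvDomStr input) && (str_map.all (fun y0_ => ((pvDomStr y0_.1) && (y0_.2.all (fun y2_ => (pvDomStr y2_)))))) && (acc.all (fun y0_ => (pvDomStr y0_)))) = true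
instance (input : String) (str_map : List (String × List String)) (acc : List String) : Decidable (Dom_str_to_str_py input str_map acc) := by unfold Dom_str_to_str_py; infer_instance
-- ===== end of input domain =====

-- One line: B replaces A's recursive backtracking generator by a bottom-up dynamic
-- programming table over suffix start positions (each suffix expanded once, rows reused),
-- same yielded strings in the same order (alternative decomposition, same measured cost).

-- ===== PORT A =====
-- fuel makes the recursion total; with Pre_ (no empty prefix with replacements) the
-- Python recursion depth is at most input.length, so fuel input.length+1 is never exhausted.
def pvGoA (fuel : Nat) (input : List Char) (str_map : List (String × List String)) (acc : List String) : List String :=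
  match fuel with
  | 0 => []
  | f + 1 =>
    let out := str_map.foldl (fun out pr =>
      if PySem.Chars.startswith input pr.1.toList then
        pr.2.foldl (fun out rep =>
          out ++ pvGoA f (input.drop pr.1.toList.length) str_map (acc ++ [rep])) out
      else out) []
    out ++ (if input = [] then [PySem.Str.join "" acc] else [])

def str_to_str_py (input : String) (str_map : List (String × List String)) (acc : List String) : List String :=
  pvGoA (input.toList.length + 1) input.toList str_map acc

-- ===== PORT B =====
-- Source B's dict 'table' keyed by position i (built for i = n down to n-k+1) is the list
-- 'pvBuildB … k' with head = row at position n-k+1; 'table[i + len]' is index len-1.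
-- 'input.startswith(prefix, i)' is exact as startswith on input.drop i (0 ≤ i ≤ n).
-- 'row.extend(replacement + tail for tail in …)' is the flatMap/map append.
def pvBuildB (input : List Char) (sm : List (String × List String)) (n : Nat) : Nat → List (List (List Char))
  | 0 => []
  | k + 1 =>
    let tbl := pvBuildB input sm n k
    let i := n - k
    ((sm.flatMap (fun pr =>
        if PySem.Chars.startswith (input.drop i) pr.1.toList then
          pr.2.flatMap (fun rep => (tbl.getD (pr.1.toList.length - 1) []).map (fun tail => rep.toList ++ tail))
        else []))
      ++ (if i = n then [[]] else [])) :: tbl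

def str_to_str_py_alt (input : String) (str_map : List (String × List String)) (acc : List String) : List String :=
  ((pvBuildB input.toList str_map input.toList.length (input.toList.length + 1)).headD []).map
    (fun s => PySem.Str.join "" acc ++ String.ofList s)

-- ===== PRECONDITION & SPEC =====
-- Pre_ excludes maps with an empty-string prefix carrying a non-empty replacement list:
-- there the Python A recurses forever (never returns), so no value can be claimed.
def Pre_str_to_str_py (input : String) (str_map : List (String × List String)) (acc : List String) : Prop :=
  ∀ pr ∈ str_map, pr.1 ≠ "" ∨ pr.2 = []
instance (input : String) (str_map : List (String × List String)) (acc : List String) : Decidable (Pre_str_to_str_py input str_map acc) := by unfold Pre_str_to_str_py; infer_instance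

def pvWitness_str_to_str_py : String × (List (String × List String)) × List String :=
  ("ab", [("a", ["x", "y"]), ("ab", ["z"]), ("b", ["w"])], ["p"])

def Spec_str_to_str_py (input : String) (str_map : List (String × List String)) (acc : List String) (out : List String) : Prop := out = str_to_str_py_alt input str_map acc
instance (input : String) (str_map : List (String × List String)) (acc : List String) (out : List String) : Decidable (Spec_str_to_str_py input str_map acc out) := by unfold Spec_str_to_str_py; infer_instance

-- ===== CLAIM (what is proved, stated in full; the proofs are below) =====
def Claim_equal_str_to_str_py : Prop := ∀ (input : String) (str_map : List (String × List String)) (acc : List String), Dom_str_to_str_py input str_map acc → Pre_str_to_str_py input str_map acc → Spec_str_to_str_py input str_map acc (str_to_str_py input str_map acc)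

-- ===== LEMMAS AND PROOFS =====

-- reference function: fuelled expansions of a suffix (pure spec used only in proofs)
def pvE (sm : List (String × List String)) : Nat → List Char → List (List Char)
  | 0, _ => []
  | f + 1, input =>
    (sm.flatMap (fun pr =>
      if PySem.Chars.startswith input pr.1.toList then
        pr.2.flatMap (fun rep => (pvE sm f (input.drop pr.1.toList.length)).map (fun s => rep.toList ++ s))
      else []))
    ++ (if input = [] then [[]] else [])

lemma pvJoinNil_cons (x : List Char) (l : List (List Char)) :
    PySem.Chars.join [] (x :: l) = x ++ PySem.Chars.join [] l := by
  cases l <;> simp [PySem.Chars.join_singleton, PySem.Chars.join_cons_cons]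

lemma pvJoinNil_append_singleton (l : List (List Char)) (x : List Char) :
    PySem.Chars.join [] (l ++ [x]) = PySem.Chars.join [] l ++ x := by
  induction l with
  | nil => simp [PySem.Chars.join_singleton]
  | cons a l ih => simp [pvJoinNil_cons, ih, List.append_assoc]

lemma pvJoinStr (acc : List String) :
    PySem.Str.join "" acc = String.ofList (PySem.Chars.join [] (acc.map String.toList)) := by
  have h : (PySem.Str.join "" acc).toList = PySem.Chars.join [] (acc.map String.toList) := by simp
  rw [← h, String.ofList_toList]

lemma pvBody {β : Type} (sm : List (String × List String)) (c : (String × List String) → Bool)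
    (k : (String × List String) → String → List β) (init : List β) :
    sm.foldl (fun out pr => if c pr then pr.2.foldl (fun o r => o ++ k pr r) out else out) init
      = init ++ sm.flatMap (fun pr => if c pr then pr.2.flatMap (k pr) else []) := by
  induction sm generalizing init with
  | nil => simp
  | cons pr sm ih =>
    simp only [List.foldl_cons, List.flatMap_cons]
    have hstep : (if c pr = true then pr.2.foldl (fun o r => o ++ k pr r) init else init)
        = init ++ (if c pr = true then pr.2.flatMap (k pr) else []) := by
      by_cases hc : c pr = true
      · rw [if_pos hc, if_pos hc, PySem.List.foldl_append_eq_flatMap (k pr) pr.2 init]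
      · rw [if_neg hc, if_neg hc, List.append_nil]
    rw [hstep, ih, List.append_assoc]

-- A's port equals the reference expansions mapped under the joined accumulator.
lemma pvMainA (sm : List (String × List String)) (f : Nat) :
    ∀ (input : List Char) (acc : List String),
      pvGoA f input sm acc
        = (pvE sm f input).map
            (fun s => String.ofList (PySem.Chars.join [] (acc.map String.toList) ++ s)) := by
  induction f with
  | zero => intro input acc; simp [pvGoA, pvE]
  | succ f ih =>
    intro input acc
    simp only [pvGoA, pvE]
    rw [pvBody]
    simp only [List.nil_append, List.map_append, List.map_flatMap]
    congr 1
    · apply List.flatMap_congr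
      intro pr _
      by_cases hc : PySem.Chars.startswith input pr.1.toList = true
      case neg => rw [if_neg hc, if_neg hc]; simp
      case pos =>
        rw [if_pos hc, if_pos hc, List.map_flatMap]
        apply List.flatMap_congr
        intro rep _
        rw [ih, List.map_map]
        apply List.map_congr_left
        intro s _
        simp only [Function.comp_apply, List.map_append, List.map_cons, List.map_nil,
          pvJoinNil_append_singleton, List.append_assoc]
    · by_cases h : input = [] <;> simp [h, pvJoinStr]

-- under Pre_, pvE is fuel-independent once fuel exceeds the suffix length
lemma pvE_stable (sm : List (String × List String))
    (hpre : ∀ pr ∈ sm, pr.1 ≠ "" ∨ pr.2 = []) :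
    ∀ (f g : Nat) (input : List Char), input.length < f → input.length < g →
      pvE sm f input = pvE sm g input := by
  intro f
  induction f with
  | zero => intro g input hf; omega
  | succ f ih =>
    intro g input hf hg
    cases g with
    | zero => omega
    | succ g =>
      simp only [pvE]
      congr 1
      apply List.flatMap_congr
      intro pr hpr
      by_cases hc : PySem.Chars.startswith input pr.1.toList = true
      case neg => simp [hc]
      case pos =>
        rw [if_pos hc, if_pos hc]
        rcases hpre pr hpr with hne | hnil
        · have hlen : 0 < pr.1.toList.length := by
            cases h : pr.1.toList with
            | nil => exact absurd (by simpa using congrArg String.ofList h) hne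
            | cons a l => simp [h]
          have hdrop : (input.drop pr.1.toList.length).length < f := by
            have := (PySem.Chars.startswith_iff input pr.1.toList).1 hc |>.length_le
            simp only [List.length_drop]; omega
          have hdropg : (input.drop pr.1.toList.length).length < g := by
            have := (PySem.Chars.startswith_iff input pr.1.toList).1 hc |>.length_le
            simp only [List.length_drop]; omega
          rw [ih g (input.drop pr.1.toList.length) hdrop hdropg]
        · simp [hnil]

-- the DP table rows are exactly pvE at the corresponding suffixes
lemma pvBuild_inv (input : List Char) (sm : List (String × List String))
    (hpre : ∀ pr ∈ sm, pr.1 ≠ "" ∨ pr.2 = []) :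
    ∀ (k : Nat), k ≤ input.length + 1 →
      pvBuildB input sm input.length k
        = (List.range k).map (fun j => pvE sm (input.length + 1) (input.drop (input.length + 1 - k + j))) := by
  intro k
  induction k with
  | zero => intro _; simp [pvBuildB]
  | succ k ih =>
    intro hk
    have hk' : k ≤ input.length + 1 := by omega
    set n := input.length with hn
    simp only [pvBuildB, ih hk']
    rw [List.range_succ_eq_map]
    simp only [List.map_cons, List.map_map]
    refine List.cons_eq_cons.mpr ⟨?_, ?_⟩
    · -- the new row equals pvE at position i = n - k
      have hi : n + 1 - (k + 1) + 0 = n - k := by omega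
      rw [hi]
      have hflen : (input.drop (n - k)).length < n + 1 := by simp; omega
      -- unfold pvE at fuel n+1 on the right-hand side only
      conv_rhs => rw [pvE]
      congr 1
      · apply List.flatMap_congr
        intro pr hpr
        by_cases hc : PySem.Chars.startswith (input.drop (n - k)) pr.1.toList = true
        case neg => simp [hc]
        case pos =>
          rw [if_pos hc, if_pos hc]
          rcases hpre pr hpr with hne | hnil
          case inr => simp [hnil]
          case inl =>
            apply List.flatMap_congr
            intro rep _
            congr 1
            have hlen : 0 < pr.1.toList.length := by
              cases h : pr.1.toList with
              | nil => exact absurd (by simpa using congrArg String.ofList h) hne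
              | cons a l => simp [h]
            have hle : pr.1.toList.length ≤ (input.drop (n - k)).length :=
              ((PySem.Chars.startswith_iff _ _).1 hc).length_le
            have hdn : (input.drop (n - k)).length = n - (n - k) := by
              simp only [List.length_drop]; omega
            have hklen : pr.1.toList.length ≤ k := by
              have : n - (n - k) = k := by omega
              omega
            have hidx : pr.1.toList.length - 1 < k := by omega
            rw [List.getD_eq_getElem?_getD, List.getElem?_map, List.getElem?_range hidx]
            simp only [Option.map_some, Option.getD_some]
            have harg : input.drop (n + 1 - k + (pr.1.toList.length - 1)) = (input.drop (n - k)).drop pr.1.toList.length := by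
              rw [List.drop_drop]
              congr 1
              omega
            rw [harg]
            apply pvE_stable sm hpre
            · simp only [List.length_drop] at hle ⊢; omega
            · simp only [List.length_drop] at hle ⊢; omega
      · have : (input.drop (n - k) = []) ↔ (n - k = n) := by
          rw [List.drop_eq_nil_iff]
          omega
        by_cases h : n - k = n
        · rw [if_pos h, if_pos (this.2 h)]
        · rw [if_neg h, if_neg (fun hh => h (this.1 hh))]
    · -- the old rows: reindex n+1-(k+1)+(j+1) = n+1-k+j
      apply List.map_congr_left
      intro j hj
      simp only [Function.comp_apply]
      congr 2
      have : j < k := List.mem_range.1 hj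
      omega

-- ===== VERDICT (by name: the statement is the Claim_ definition above) =====
theorem str_to_str_py_spec : Claim_equal_str_to_str_py := by
  intro input str_map acc _ hpre
  unfold Spec_str_to_str_py
  unfold str_to_str_py str_to_str_py_alt
  rw [pvMainA, pvBuild_inv input.toList str_map hpre (input.toList.length + 1) (le_refl _)]
  rw [List.range_succ_eq_map]
  simp only [List.map_cons, List.headD_cons]
  have h0 : input.toList.length + 1 - (input.toList.length + 1) + 0 = 0 := by omega
  rw [h0, List.drop_zero]
  apply List.map_congr_left
  intro s _
  rw [pvJoinStr]
  apply String.ext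
  simp
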